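-- pv_equiv track=rewrite | github.com/basti42/advent_of_code_2017 | day6/day6.py | count_until_recurring
-- ===== SOURCE A (Python) =====
-- def count_until_recurring(blocks):
--
--     # keep track of the states and cycles
--     # states as a dict, with current state as key and overall cycle number as value
--     # so the infinite loop cycle is the exitingIndex - states[currBlockConfiguration]
--     states, cycles = dict(), 0
--
--     counter = 0
--     while tuple(blocks) not in states:
--
--         states[tuple(blocks)] = counter   #current state to be kept track of
--         counter += 1
--
--         # 1) find highest number bank
--         # 2) redistribute blocks
--         # 3) update cycles
--
--         # the first occurence of the max value in the list is the bank to use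
--         # since .index(max(blocks)) returns the first occurence of the max value
--         # no further checking against other occurences of max(blocks) in the blocks is needed
--
--         maxidx = blocks.index(max(blocks))
--         num_blocks = blocks[maxidx]
--         blocks[maxidx] = 0
--
--         # redistribute
--         i = maxidx + 1
--         while num_blocks > 0:
--             blocks[i%len(blocks)] += 1
--             num_blocks -= 1
--             i += 1
--
--         # update cycles
--         cycles += 1
--
--     inf_loop_cycles = counter - states[tuple(blocks)]
--     return cycles, inf_loop_cycles
-- ===== SOURCE B (Python) =====
-- def count_until_recurring(blocks):
--     # B: redistributes each round in closed form via divmod instead of A's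
--     # one-block-at-a-time inner loop; works on immutable tuples (does not mutate
--     # the caller's list).
--     n = len(blocks)
--     seen = {}
--     counter = 0
--     cur = tuple(blocks)
--     while cur not in seen:
--         seen[cur] = counter
--         counter += 1
--         m = max(cur)
--         i = cur.index(m)
--         nxt = list(cur)
--         nxt[i] = 0
--         if m > 0:
--             q, r = divmod(m, n)
--             nxt = [b + q for b in nxt]
--             for k in range(r):
--                 nxt[(i + 1 + k) % n] += 1
--         cur = tuple(nxt)
--     return counter, counter - seen[cur]
-- ===== Notes on version B (the rewrite author's own statement) =====
-- stated objective: alternative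
-- what changed: Each redistribution round adds q = max // n to every bank and one extra block to the r = max % n banks after the source (closed-form divmod) instead of handing out the max one block at a time in an inner while loop; B also works on immutable tuples and does not mutate the caller's list.
import Mathlib
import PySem

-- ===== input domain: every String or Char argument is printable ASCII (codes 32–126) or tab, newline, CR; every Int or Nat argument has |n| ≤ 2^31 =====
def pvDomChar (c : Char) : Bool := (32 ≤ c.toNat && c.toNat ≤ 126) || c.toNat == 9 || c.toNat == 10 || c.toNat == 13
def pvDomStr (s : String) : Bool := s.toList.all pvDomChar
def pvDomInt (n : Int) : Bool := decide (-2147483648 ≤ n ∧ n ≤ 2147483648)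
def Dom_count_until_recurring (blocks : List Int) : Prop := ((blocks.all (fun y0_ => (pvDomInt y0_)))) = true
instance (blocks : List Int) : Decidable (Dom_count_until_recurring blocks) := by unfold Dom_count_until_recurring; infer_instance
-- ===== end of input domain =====

-- B redistributes each round in closed form by divmod instead of A's one-block-at-a-time
-- inner loop; A mutates its argument list in place, B does not — the equivalence proved here
-- is about the return value only.

-- Fuel shared by both ports: an upper bound on loop iterations used only to make the loops total
-- (a totality guard, not part of either algorithm; both ports run out at the same point, and under
-- Pre_ the Python loops terminate).
def pvFuel (blocks : List Int) : Nat :=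
  let n := blocks.length
  let sa := (blocks.map Int.natAbs).sum
  (2 * (n + 2) * (sa + 1) + 1) ^ n + 2

-- ===== PORT A =====
-- inner while: `while num_blocks > 0: blocks[i%len(blocks)] += 1; num_blocks -= 1; i += 1`
-- (index i % len is always in range, so Python's `+= 1` is List.modify)
def aRedis (blocks : List Int) (i : Nat) (num : Int) : List Int :=
  if 0 < num then
    aRedis (blocks.modify (i % blocks.length) (· + 1)) (i + 1) (num - 1)
  else blocks
termination_by num.toNat
decreasing_by omega

def aLoop : Nat → List Int → PySem.Dict (List Int) Int → Int → Int → Int × Int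
  | 0, _, _, cycles, _ => (cycles, -1)   -- fuel exhausted (never reached with pvFuel under Pre_)
  | fuel + 1, blocks, states, cycles, counter =>
    match PySem.Dict.get? states blocks with
    | some first => (cycles, counter - first)    -- exit: counter - states[tuple(blocks)]
    | none =>
      let states := PySem.Dict.insert states blocks counter
      let counter := counter + 1
      match PySem.List.max? blocks (fun y => y) with
      | none => (cycles, -1)                     -- max([]) raises ValueError: excluded by Pre_
      | some mx =>
        let maxidx := (PySem.List.index? blocks mx).getD 0     -- .index of the max never fails
        let num_blocks := (PySem.List.pyGet? blocks (maxidx : Int)).getD 0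
        let blocks := blocks.set maxidx 0        -- blocks[maxidx] = 0 (index in range)
        let blocks := aRedis blocks (maxidx + 1) num_blocks
        aLoop fuel blocks states (cycles + 1) counter

def count_until_recurring (blocks : List Int) : Int × Int :=
  aLoop (pvFuel blocks) blocks PySem.Dict.empty 0 0

-- ===== PORT B =====
-- one redistribution round of Source B: zero bank i, add q = m // n everywhere, +1 on the r = m % n
-- banks after i (indices always in range, so `+= 1` is List.modify; range(r) is List.range r.toNat, r ≥ 0)
def bStep (n : Nat) (cur : List Int) (m : Int) (i : Nat) : List Int :=
  let nxt := cur.set i 0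
  if 0 < m then
    let q := PySem.Int.floordiv m (n : Int)
    let r := PySem.Int.mod m (n : Int)
    (List.range r.toNat).foldl (fun b k => b.modify ((i + 1 + k) % n) (· + 1)) (nxt.map (· + q))
  else nxt

def bLoop (n : Nat) : Nat → List Int → PySem.Dict (List Int) Int → Int → Int × Int
  | 0, _, _, counter => (counter, -1)            -- fuel exhausted (never reached with pvFuel under Pre_)
  | fuel + 1, cur, seen, counter =>
    match PySem.Dict.get? seen cur with
    | some first => (counter, counter - first)
    | none =>
      let seen := PySem.Dict.insert seen cur counter
      let counter := counter + 1
      match PySem.List.max? cur (fun y => y) with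
      | none => (counter, -1)                    -- max(()) raises ValueError: excluded by Pre_
      | some m =>
        let i := (PySem.List.index? cur m).getD 0
        bLoop n fuel (bStep n cur m i) seen counter

def count_until_recurring_alt (blocks : List Int) : Int × Int :=
  bLoop blocks.length (pvFuel blocks) blocks PySem.Dict.empty 0

-- ===== PRECONDITION & SPEC =====
-- Pre_ excludes only the empty list, on which both Pythons raise ValueError (max of empty sequence).
def Pre_count_until_recurring (blocks : List Int) : Prop := blocks ≠ []
instance (blocks : List Int) : Decidable (Pre_count_until_recurring blocks) := by
  unfold Pre_count_until_recurring; infer_instance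

def pvWitness_count_until_recurring : List Int := [0, 2, 7, 0]

def Spec_count_until_recurring (blocks : List Int) (out : Int × Int) : Prop := out = count_until_recurring_alt blocks
instance (blocks : List Int) (out : Int × Int) : Decidable (Spec_count_until_recurring blocks out) := by unfold Spec_count_until_recurring; infer_instance

-- ===== CLAIM (what is proved, stated in full; the proofs are below) =====
def Claim_equal_count_until_recurring : Prop := ∀ (blocks : List Int), Dom_count_until_recurring blocks → Pre_count_until_recurring blocks → Spec_count_until_recurring blocks (count_until_recurring blocks)

-- ===== LEMMAS AND PROOFS =====

-- aRedis as a fold over the offsets s, s+1, …, s+m-1 (indices taken mod the fixed length n)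
lemma aRedis_eq_fix (n : Nat) (bs : List Int) (s : Nat) (m : Int) (h : bs.length = n) :
    aRedis bs s m =
      (List.range m.toNat).foldl (fun b k => b.modify ((s + k) % n) (· + 1)) bs := by
  by_cases hm : 0 < m
  · rw [aRedis]
    simp only [hm, if_pos]
    have h2 : (bs.modify (s % bs.length) (· + 1)).length = n := by
      rw [List.length_modify]; exact h
    rw [aRedis_eq_fix n _ (s + 1) (m - 1) h2]
    have ht : m.toNat = (m - 1).toNat + 1 := by omega
    rw [ht, List.range_succ_eq_map, List.foldl_cons, List.foldl_map]
    congr 1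
    · funext b k
      have hsk : s + 1 + k = s + k.succ := by omega
      rw [hsk]
    · rw [h]
      simp
  · rw [aRedis]
    have ht : m.toNat = 0 := by omega
    simp [hm, ht]
termination_by m.toNat
decreasing_by omega

-- a fold of `modify (f k) (+1)` preserves the length
lemma length_foldl_modify (f : Nat → Nat) :
    ∀ (ks : List Nat) (bs : List Int),
      (ks.foldl (fun b k => b.modify (f k) (· + 1)) bs).length = bs.length := by
  intro ks
  induction ks with
  | nil => intro bs; rfl
  | cons k ks ih =>
    intro bs
    rw [List.foldl_cons, ih, List.length_modify]

-- pointwise value of such a fold: each cell j gains one unit per index k with f k = j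
lemma getElem?_foldl_modify (f : Nat → Nat) :
    ∀ (ks : List Nat) (bs : List Int) (j : Nat),
      (ks.foldl (fun b k => b.modify (f k) (· + 1)) bs)[j]? =
        (bs[j]?).map (· + (ks.countP (fun k => f k == j) : Int)) := by
  intro ks
  induction ks with
  | nil =>
    intro bs j
    simp
  | cons k ks ih =>
    intro bs j
    rw [List.foldl_cons, ih, List.getElem?_modify, List.countP_cons]
    cases hbj : bs[j]? with
    | none => simp
    | some v =>
      by_cases hk : f k = j
      · simp [hk]
        ring
      · have hfk : (f k == j) = false := by simp [hk]
        simp [hk, hfk]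

-- exactly one k in [0, n) has (a + k) % n = j (for j < n)
lemma countP_range_mod_eq_one (n a j : Nat) (hn : 0 < n) (hj : j < n) :
    (List.range n).countP (fun k => (a + k) % n == j) = 1 := by
  have key : ∀ b, b < n → ∀ k, k < n →
      ((b + k) % n = j ↔ k = (if b ≤ j then j - b else n + j - b)) := by
    intro b hb k hk
    have e2 : (b + k < n ∧ (b + k) % n = b + k) ∨ (n ≤ b + k ∧ (b + k) % n = b + k - n) := by
      by_cases hlt : b + k < n
      · exact Or.inl ⟨hlt, Nat.mod_eq_of_lt hlt⟩
      · refine Or.inr ⟨by omega, ?_⟩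
        rw [Nat.mod_eq_sub_mod (by omega)]
        exact Nat.mod_eq_of_lt (by omega)
    rcases e2 with ⟨hlt, e⟩ | ⟨hlt, e⟩ <;> rw [e] <;> split <;> omega
  have hbn : a % n < n := Nat.mod_lt _ hn
  have hk0n : (if a % n ≤ j then j - a % n else n + j - a % n) < n := by split <;> omega
  have hcong : (List.range n).countP (fun k => (a + k) % n == j)
      = (List.range n).countP (fun k => k == (if a % n ≤ j then j - a % n else n + j - a % n)) := by
    apply List.countP_congr
    intro k hk
    simp only [beq_iff_eq]
    rw [Nat.add_mod a k n, Nat.mod_eq_of_lt (List.mem_range.mp hk)]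
    exact key (a % n) hbn k (List.mem_range.mp hk)
  rw [hcong]
  have hcount : (List.range n).countP (fun k => k == (if a % n ≤ j then j - a % n else n + j - a % n))
      = (List.range n).count (if a % n ≤ j then j - a % n else n + j - a % n) := rfl
  rw [hcount, List.count_range, if_pos hk0n]

-- counting over Q full cycles plus a remainder
lemma countP_range_mod_cycles (n a j : Nat) (hn : 0 < n) (hj : j < n) :
    ∀ (Q R : Nat),
      (List.range (Q * n + R)).countP (fun k => (a + k) % n == j) =
        Q + (List.range R).countP (fun k => (a + k) % n == j) := by
  intro Q
  induction Q with
  | zero => intro R; simp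
  | succ Q ih =>
    intro R
    have harr : (Q + 1) * n + R = n + (Q * n + R) := by ring
    rw [harr, List.range_add, List.countP_append, List.countP_map]
    have hpred : ((fun k => (a + k) % n == j) ∘ fun x => n + x) = (fun k => (a + k) % n == j) := by
      funext k
      have : a + (n + k) = a + k + n := by ring
      simp [Function.comp, this, Nat.add_mod_right]
    rw [hpred, ih R, countP_range_mod_eq_one n a j hn hj]
    ring

-- the core redistribution identity: spreading m one-by-one from offset s equals
-- adding q = m // n everywhere and one more unit on the first r = m % n offsets
lemma fold_split_qr (n : Nat) (bs : List Int) (s : Nat) (m : Int)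
    (h : bs.length = n) (hn : 0 < n) (hm : 0 < m) :
    (List.range m.toNat).foldl (fun b k => b.modify ((s + k) % n) (· + 1)) bs =
      (List.range (PySem.Int.mod m (n : Int)).toNat).foldl
        (fun b k => b.modify ((s + k) % n) (· + 1))
        (bs.map (· + PySem.Int.floordiv m (n : Int))) := by
  set q := PySem.Int.floordiv m (n : Int) with hq
  set r := PySem.Int.mod m (n : Int) with hr
  have hnpos : (0 : Int) < (n : Int) := by exact_mod_cast hn
  have hr0 : 0 ≤ r := PySem.Int.mod_nonneg m hnpos
  have hrn : r < n := PySem.Int.mod_lt m hnpos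
  have hqr : q * n + r = m := PySem.Int.floordiv_mul_add_mod m n
  have hq0 : 0 ≤ q := by nlinarith
  have hcast : ((q.toNat * n + r.toNat : Nat) : Int) = m := by
    push_cast
    rw [Int.toNat_of_nonneg hq0, Int.toNat_of_nonneg hr0]
    linarith [hqr]
  have hm' : m.toNat = q.toNat * n + r.toNat := by omega
  apply List.ext_getElem?
  intro j
  rw [getElem?_foldl_modify, getElem?_foldl_modify]
  rw [List.getElem?_map]
  cases hbj : bs[j]? with
  | none => simp
  | some v =>
    have hjn : j < n := by
      rw [← h]
      exact (List.getElem?_eq_some_iff.mp hbj).choose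
    rw [hm', countP_range_mod_cycles n s j hn hjn q.toNat r.toNat]
    simp only [Option.map_some]
    congr 1
    have : (q.toNat : Int) = q := by omega
    push_cast
    omega

lemma length_bStep (n : Nat) (cur : List Int) (m : Int) (i : Nat) :
    (bStep n cur m i).length = cur.length := by
  unfold bStep
  by_cases hm : 0 < m
  · simp only [hm, if_pos]
    rw [length_foldl_modify, List.length_map, List.length_set]
  · simp [hm]

-- one loop iteration: A's one-by-one redistribution equals B's divmod redistribution
lemma iter_eq (n : Nat) (bs : List Int) (m : Int) (i : Nat)
    (h : bs.length = n) (hn : 0 < n) :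
    aRedis (bs.set i 0) (i + 1) m = bStep n bs m i := by
  unfold bStep
  by_cases hm : 0 < m
  · simp only [hm, if_pos]
    rw [aRedis_eq_fix n _ (i + 1) m (by rw [List.length_set]; exact h)]
    exact fold_split_qr n (bs.set i 0) (i + 1) m (by rw [List.length_set]; exact h) hn hm
  · simp only [hm, ite_false]
    rw [aRedis]
    simp [hm]

-- the two outer loops agree step by step (same dict, counter = cycles, length invariant)
lemma loop_eq (n : Nat) (hn : 0 < n) :
    ∀ (fuel : Nat) (bs : List Int) (st : PySem.Dict (List Int) Int) (c : Int),
      bs.length = n → aLoop fuel bs st c c = bLoop n fuel bs st c := by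
  intro fuel
  induction fuel with
  | zero => intro bs st c h; rfl
  | succ fuel ih =>
    intro bs st c h
    rw [aLoop, bLoop]
    cases hget : PySem.Dict.get? st bs with
    | some first => rfl
    | none =>
      simp only
      cases hmax : PySem.List.max? bs (fun y => y) with
      | none =>
        exfalso
        have : bs = [] := (PySem.List.max?_eq_none_iff bs _).mp hmax
        rw [this] at h
        simp at h
        omega
      | some m =>
        simp only
        have hmem : m ∈ bs := PySem.List.max?_mem hmax
        obtain ⟨i0, hi0⟩ := Option.isSome_iff_exists.mp
          ((PySem.List.index?_isSome_iff bs m).mpr hmem)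
        obtain ⟨hk, hval, _⟩ := PySem.List.getElem_of_index?_eq_some hi0
        rw [hi0]
        simp only [Option.getD_some]
        have hnum : (PySem.List.pyGet? bs (i0 : Int)).getD 0 = m := by
          rw [PySem.List.pyGet?_natCast, List.getElem?_eq_getElem hk]
          simp [hval]
        rw [hnum, iter_eq n bs m i0 h hn]
        exact ih (bStep n bs m i0) _ (c + 1) (by rw [length_bStep]; exact h)

-- ===== VERDICT (by name: the statement is the Claim_ definition above) =====
theorem count_until_recurring_spec : Claim_equal_count_until_recurring := by
  intro blocks _ hpre
  unfold Spec_count_until_recurring count_until_recurring count_until_recurring_alt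
  have hn : 0 < blocks.length := List.length_pos_of_ne_nil hpre
  exact loop_eq blocks.length hn (pvFuel blocks) blocks PySem.Dict.empty 0 rfl
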